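-- pv_equiv track=rewrite | github.com/HanielDorton/Project_Euler | Problem_54_Poker_Hands/Problem54-poker.py | twoPairs
-- ===== SOURCE A (Python) =====
-- def twoPairs (hands):
--     hand1, hand2 = False, False
--     hand1twos = []
--     hand2twos = []
--     hand1extra, hand2extra = 0,0
--     if len(set(hands[0])) == 3:
--         hand1 = True
--         for i in set(hands[0]):
--             if hands[0].count(i) == 2:
--                 hand1twos.append(i)
--             else:
--                 hand1extra = i
--     if len(set(hands[1])) == 3:
--         hand2 = True
--         for i in set(hands[1]):
--             if hands[1].count(i) == 2:
--                 hand2twos.append(i)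
--             else:
--                 hand2extra = i
--     hand1twos.sort()
--     hand2twos.sort()
--     if hand1 == True and hand2 == True:
--         if hand1twos[1]  == hand2twos[1]:
--             if hand1twos[0] == hand2twos[0]:
--                 if hand1extra > hand2extra:
--                     return 1
--                 else:
--                     return 2
--             if hand1twos[0] > hand2twos[0]:
--                 return 1
--             else:
--                 return 2
--         if hand1twos[1] > hand2twos[1]:
--             return 1
--         else:
--             return 2
--     if hand1 == True:
--         return 1
--     if hand2 == True:
--         return 2
--     return None
-- ===== SOURCE B (Python) =====
-- def twoPairs(hands):
--     def rle(xs):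
--         # run-length encoding of a sorted list, recursively
--         if not xs:
--             return []
--         rest = rle(xs[1:])
--         if rest and rest[0][0] == xs[0]:
--             return [(xs[0], rest[0][1] + 1)] + rest[1:]
--         return [(xs[0], 1)] + rest
--
--     def profile(hand):
--         runs = rle(sorted(hand))
--         pairs = [v for v, c in runs if c == 2]   # already in ascending order
--         extra = next((v for v, c in runs if c != 2), 0)
--         return len(runs) == 3, pairs, extra
--
--     q1, p1, e1 = profile(hands[0])
--     q2, p2, e2 = profile(hands[1])
--     if q1 and q2:
--         return 1 if (p1[1], p1[0], e1) > (p2[1], p2[0], e2) else 2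
--     if q1:
--         return 1
--     if q2:
--         return 2
--     return None
-- ===== Notes on version B (the rewrite author's own statement) =====
-- stated objective: alternative
-- what changed: B sorts each hand once and derives pairs/extra from a recursive run-length encoding of the sorted hand (pairs come out already in ascending order, so no second sort and no per-value count() rescans), then decides both-qualify case by one lexicographic tuple comparison instead of A's set-iteration with count() scans, a separate .sort() of the pair list and a nested if-cascade.
import Mathlib
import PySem

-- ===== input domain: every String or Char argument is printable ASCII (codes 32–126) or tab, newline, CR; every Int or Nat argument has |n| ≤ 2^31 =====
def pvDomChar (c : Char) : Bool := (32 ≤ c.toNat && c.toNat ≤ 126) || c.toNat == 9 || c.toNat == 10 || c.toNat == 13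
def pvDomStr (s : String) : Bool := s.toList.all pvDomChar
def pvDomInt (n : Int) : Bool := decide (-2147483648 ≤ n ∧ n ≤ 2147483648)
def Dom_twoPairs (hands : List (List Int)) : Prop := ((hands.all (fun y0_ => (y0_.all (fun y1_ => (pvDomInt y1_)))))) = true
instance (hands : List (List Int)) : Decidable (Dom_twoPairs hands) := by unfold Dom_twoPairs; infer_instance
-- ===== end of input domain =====

-- B sorts each hand once and reads pairs/extra off a recursive run-length encoding of the
-- sorted hand (so no set + per-value count() rescans and no second sort), then decides the
-- both-qualify case by one lexicographic tuple comparison (objective: alternative).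
-- A's iteration over Python's set is ported as iteration over PySem.Set (first-insertion order);
-- inside Pre_ the returned value does not depend on that iteration order.

-- ===== PORT A =====
def twoPairs (hands : List (List Int)) : Option Int :=
  match PySem.List.pyGet? hands 0, PySem.List.pyGet? hands 1 with
  | some h0, some h1 =>
    let s0 : PySem.Set Int := PySem.Set.ofList h0
    let s1 : PySem.Set Int := PySem.Set.ofList h1
    let hand1 : Bool := PySem.Set.len s0 == 3
    let hand2 : Bool := PySem.Set.len s1 == 3
    -- the for-loop over set(hands[0]) accumulating (hand1twos, hand1extra)
    let st1 : List Int × Int :=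
      if hand1 then
        s0.foldl (fun st i =>
          if PySem.List.count h0 i == 2 then (st.1 ++ [i], st.2) else (st.1, i)) ([], 0)
      else ([], 0)
    let st2 : List Int × Int :=
      if hand2 then
        s1.foldl (fun st i =>
          if PySem.List.count h1 i == 2 then (st.1 ++ [i], st.2) else (st.1, i)) ([], 0)
      else ([], 0)
    let t1 := PySem.List.sorted st1.1 (fun x => x) false
    let t2 := PySem.List.sorted st2.1 (fun x => x) false
    if hand1 && hand2 then
      -- hand1twos[1] / hand2twos[1]: IndexError (none) is excluded by Pre_
      match PySem.List.pyGet? t1 1, PySem.List.pyGet? t2 1 with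
      | some a1, some a2 =>
        if a1 == a2 then
          match PySem.List.pyGet? t1 0, PySem.List.pyGet? t2 0 with
          | some b1, some b2 =>
            if b1 == b2 then
              if st1.2 > st2.2 then some 1 else some 2
            else if b1 > b2 then some 1 else some 2
          | _, _ => none
        else if a1 > a2 then some 1 else some 2
      | _, _ => none
    else if hand1 then some 1
    else if hand2 then some 2
    else none
  | _, _ => none

-- ===== PORT B =====
-- rle: B's recursive run-length encoding of a (sorted) list
def pvRle : List Int → List (Int × Int)
  | [] => []
  | x :: xs =>
    match pvRle xs with
    | (v, c) :: t => if v == x then (x, c + 1) :: t else (x, 1) :: ((v, c) :: t)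
    | [] => [(x, 1)]

-- profile: (qualifies, pairs in ascending order, extra); next(...) over runs = first match
def pvProfile (hand : List Int) : Bool × List Int × Int :=
  let runs := pvRle (PySem.List.sorted hand (fun x => x) false)
  let pairs := (runs.filter (fun p => p.2 == 2)).map (fun p => p.1)
  let extra : Int :=
    match runs.filter (fun p => !(p.2 == 2)) with
    | [] => 0
    | p :: _ => p.1
  (runs.length == 3, pairs, extra)

-- Python's lexicographic `key1 > key2` on 3-tuples
def pvKeyGT (a b : Int × Int × Int) : Bool :=
  decide (a.1 > b.1) || (a.1 == b.1 &&
    (decide (a.2.1 > b.2.1) || (a.2.1 == b.2.1 && decide (a.2.2 > b.2.2))))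

def twoPairs_alt (hands : List (List Int)) : Option Int :=
  -- B reads hands[0] and hands[1]; on shorter input Python raises (excluded by Pre_)
  match hands with
  | h0 :: h1 :: _ =>
    let pr1 := pvProfile h0
    let pr2 := pvProfile h1
    if pr1.1 && pr2.1 then
      -- p1[1] / p1[0] / p2[1] / p2[0] in Python's evaluation order:
      -- IndexError (none) is excluded by Pre_
      match PySem.List.pyGet? pr1.2.1 1 with
      | none => none
      | some a1 =>
        match PySem.List.pyGet? pr1.2.1 0 with
        | none => none
        | some b1 =>
          match PySem.List.pyGet? pr2.2.1 1 with
          | none => none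
          | some a2 =>
            match PySem.List.pyGet? pr2.2.1 0 with
            | none => none
            | some b2 =>
              some (if pvKeyGT (a1, b1, pr1.2.2) (a2, b2, pr2.2.2) then 1 else 2)
    else if pr1.1 then some 1
    else if pr2.1 then some 2
    else none
  | _ => none

-- ===== PRECONDITION & SPEC =====
-- number of distinct values occurring exactly twice in a hand
def pvNumPairs (h : List Int) : Nat :=
  ((PySem.Set.ofList h).filter (fun v => PySem.List.count h v == 2)).length

-- Pre_ excludes exactly the inputs where A raises IndexError: fewer than two hands, and the case
-- where both hands have exactly 3 distinct values but one of them has fewer than two paired values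
-- (A then indexes hand?twos[1] into a too-short list).
def Pre_twoPairs (hands : List (List Int)) : Prop :=
  2 ≤ hands.length ∧
    ((PySem.Set.ofList (hands.getD 0 [])).length = 3 ∧
     (PySem.Set.ofList (hands.getD 1 [])).length = 3 →
      2 ≤ pvNumPairs (hands.getD 0 []) ∧ 2 ≤ pvNumPairs (hands.getD 1 []))
instance (hands : List (List Int)) : Decidable (Pre_twoPairs hands) := by
  unfold Pre_twoPairs; infer_instance

def pvWitness_twoPairs : List (List Int) := [[2, 2, 3, 3, 5], [4, 4, 6, 6, 7]]

def Spec_twoPairs (hands : List (List Int)) (out : Option Int) : Prop := out = twoPairs_alt hands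
instance (hands : List (List Int)) (out : Option Int) : Decidable (Spec_twoPairs hands out) := by
  unfold Spec_twoPairs; infer_instance

-- ===== CLAIM (what is proved, stated in full; the proofs are below) =====
def Claim_equal_twoPairs : Prop := ∀ (hands : List (List Int)), Dom_twoPairs hands → Pre_twoPairs hands → Spec_twoPairs hands (twoPairs hands)

-- ===== LEMMAS AND PROOFS =====
def pvExtras (h : List Int) : List Int :=
  (PySem.Set.ofList h).filter (fun v => !(PySem.List.count h v == 2))

-- A's for-loop over the set, split into the pairs list and the last non-pair value
theorem pv_loop (h : List Int) :
    (PySem.Set.ofList h).foldl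
      (fun st i => if PySem.List.count h i == 2 then (st.1 ++ [i], st.2) else (st.1, i))
      (([] : List Int), (0 : Int))
    = ((PySem.Set.ofList h).filter (fun v => PySem.List.count h v == 2),
       (pvExtras h).foldl (fun _ i => i) 0) := by
  rw [PySem.List.foldl_congr_mem _ _
    (fun st i => ((if (PySem.List.count h i == 2) then st.1 ++ [i] else st.1),
                  (if (!(PySem.List.count h i == 2)) then i else st.2))) _
    (by intro acc x _; cases hx : (PySem.List.count h x == 2) <;> simp only [hx] <;> rfl)]
  rw [PySem.List.foldl_prod_mk
    (f := fun acc i => if (PySem.List.count h i == 2) then acc ++ [i] else acc)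
    (g := fun acc i => if (!(PySem.List.count h i == 2)) then i else acc)]
  rw [PySem.List.foldl_append_if_eq_filter, PySem.List.foldl_if_eq_foldl_filter]
  simp [pvExtras]

theorem pv_extras_len (h : List Int) :
    pvNumPairs h + (pvExtras h).length = (PySem.Set.ofList h).length := by
  simp [pvNumPairs, pvExtras, ← List.countP_eq_length_filter]
  simpa using (List.length_eq_countP_add_countP
    (l := PySem.Set.ofList h) (p := fun v => PySem.List.count h v == 2)).symm

-- A's nested if-cascade equals B's single tuple comparison
theorem pv_cascade (a1 b1 e1 a2 b2 e2 : Int) :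
    (if a1 == a2 then
       (if b1 == b2 then (if e1 > e2 then (some 1 : Option Int) else some 2)
        else if b1 > b2 then some 1 else some 2)
     else if a1 > a2 then some 1 else some 2)
    = some (if pvKeyGT (a1, b1, e1) (a2, b2, e2) then 1 else 2) := by
  simp only [pvKeyGT]
  split_ifs <;> simp_all <;> omega

-- ---- rle characterization on a sorted list ----
theorem pv_rle_nil_iff (s : List Int) : pvRle s = [] ↔ s = [] := by
  cases s with
  | nil => simp [pvRle]
  | cons x xs =>
    simp only [pvRle]
    constructor
    · intro hcontra
      cases hrec : pvRle xs with
      | nil => rw [hrec] at hcontra; simp at hcontra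
      | cons p t =>
        rw [hrec] at hcontra
        obtain ⟨v, c⟩ := p
        by_cases hvx : (v == x) = true <;> simp [hvx] at hcontra
    · intro h; simp at h

theorem pv_rle_head (x : Int) (xs : List Int) :
    ∃ c t, pvRle (x :: xs) = (x, c) :: t := by
  simp only [pvRle]
  cases hrec : pvRle xs with
  | nil => exact ⟨1, [], rfl⟩
  | cons p t =>
    obtain ⟨v, c⟩ := p
    by_cases hvx : (v == x) = true
    · exact ⟨c + 1, t, by simp [hvx]⟩
    · exact ⟨1, (v, c) :: t, by simp [hvx]⟩

theorem pv_rle_mem (s : List Int) (v : Int) :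
    v ∈ (pvRle s).map Prod.fst ↔ v ∈ s := by
  induction s with
  | nil => simp [pvRle]
  | cons x xs ih =>
    simp only [pvRle]
    cases hrec : pvRle xs with
    | nil =>
      have hxs : xs = [] := (pv_rle_nil_iff xs).mp hrec
      subst hxs; simp
    | cons p t =>
      obtain ⟨v0, c⟩ := p
      rw [hrec] at ih
      cases hvx : (v0 == x) with
      | true =>
        have hv0 : v0 = x := by simpa using hvx
        subst hv0
        simp only [hvx, if_true]
        simp only [List.map_cons, List.mem_cons] at ih ⊢
        tauto
      | false =>
        simp only [hvx, Bool.false_eq_true, if_false]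
        simp only [List.map_cons, List.mem_cons] at ih ⊢
        tauto

theorem pv_rle_pairwise (s : List Int) (hs : s.Pairwise (· ≤ ·)) :
    ((pvRle s).map Prod.fst).Pairwise (· < ·) := by
  induction s with
  | nil => simp [pvRle]
  | cons x xs ih =>
    rw [List.pairwise_cons] at hs
    obtain ⟨hle, hxs⟩ := hs
    have ih' := ih hxs
    simp only [pvRle]
    cases hrec : pvRle xs with
    | nil => simp
    | cons p t =>
      obtain ⟨v0, c⟩ := p
      rw [hrec] at ih'
      have hmem : ∀ y, y ∈ ((v0, c) :: t).map Prod.fst → y ∈ xs := by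
        intro y hy
        exact (pv_rle_mem xs y).mp (by rw [hrec]; exact hy)
      cases hvx : (v0 == x) with
      | true =>
        have hv0 : v0 = x := by simpa using hvx
        subst hv0
        simp only [hvx, if_true, List.map_cons]
        simp only [List.map_cons, List.pairwise_cons] at ih' ⊢
        exact ⟨ih'.1, ih'.2⟩
      | false =>
        simp only [hvx, Bool.false_eq_true, if_false, List.map_cons]
        simp only [List.map_cons, List.pairwise_cons] at ih' ⊢
        have hxv0 : x < v0 := by
          have hv0xs : v0 ∈ xs := hmem v0 (by simp)
          have h1 : x ≤ v0 := hle v0 hv0xs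
          have hne : v0 ≠ x := by simpa using hvx
          omega
        refine ⟨?_, ih'.1, ih'.2⟩
        intro y hy
        rcases List.mem_cons.mp hy with hy | hy
        · omega
        · have := ih'.1 y hy; omega

-- if x occurs in sorted xs and x is ≤ everything in xs, then the head run of rle xs is x
theorem pv_rle_head_of_mem (x : Int) (xs : List Int) (hs : xs.Pairwise (· ≤ ·))
    (hle : ∀ y ∈ xs, x ≤ y) (hmem : x ∈ xs) :
    ∃ c t, pvRle xs = (x, c) :: t := by
  cases xs with
  | nil => simp at hmem
  | cons y ys =>
    have hyx : y = x := by
      have h1 : x ≤ y := hle y (by simp)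
      rw [List.pairwise_cons] at hs
      have h2 : y ≤ x := by
        rcases List.mem_cons.mp hmem with h | h
        · omega
        · exact hs.1 x h
      omega
    subst hyx
    exact pv_rle_head y ys

theorem pv_rle_count (s : List Int) (hs : s.Pairwise (· ≤ ·)) (v : Int) (c : Int)
    (hmem : (v, c) ∈ pvRle s) : c = (s.count v : Int) := by
  induction s generalizing v c with
  | nil => simp [pvRle] at hmem
  | cons x xs ih =>
    rw [List.pairwise_cons] at hs
    obtain ⟨hle, hxs⟩ := hs
    cases hrec : pvRle xs with
    | nil =>
      have hxs0 : xs = [] := (pv_rle_nil_iff xs).mp hrec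
      simp only [pvRle, hrec] at hmem
      simp at hmem
      obtain ⟨hv, hc⟩ := hmem
      rw [hv, hc, hxs0]
      simp [List.count_cons]
    | cons p t =>
      obtain ⟨v0, c0⟩ := p
      simp only [pvRle, hrec] at hmem
      have hpw := pv_rle_pairwise xs hxs
      rw [hrec] at hpw
      simp only [List.map_cons, List.pairwise_cons] at hpw
      cases hvx : (v0 == x) with
      | true =>
        have hv0 : v0 = x := by simpa using hvx
        simp only [hvx, if_true, List.mem_cons] at hmem
        rcases hmem with h | h
        · rw [Prod.mk.injEq] at h
          obtain ⟨hv, hc⟩ := h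
          have hc0 : c0 = (xs.count v : Int) := by
            refine ih hxs v c0 ?_
            rw [hrec, hv0, ← hv]
            simp
          rw [hc, hc0, hv]
          simp [List.count_cons]
        · have hc : c = (xs.count v : Int) := ih hxs v c (by rw [hrec]; exact List.mem_cons_of_mem _ h)
          have hlt : v0 < v := hpw.1 v (List.mem_map_of_mem h)
          have hvne : ¬ (v = x) := by rw [← hv0]; omega
          have hvne' : ¬ (x = v) := fun he => hvne he.symm
          rw [hc]
          simp [List.count_cons, hvne, hvne']
      | false =>
        -- v0 ≠ x forces x ∉ xs
        have hxnot : x ∉ xs := by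
          intro hx
          obtain ⟨c1, t1, h⟩ := pv_rle_head_of_mem x xs hxs hle hx
          rw [h] at hrec
          have hv0 : v0 = x := by
            have := congrArg (fun l => (l.headI : Int × Int).1) hrec
            simpa using this.symm
          simp [hv0] at hvx
        simp only [hvx, Bool.false_eq_true, if_false, List.mem_cons] at hmem
        rcases hmem with h | h
        · rw [Prod.mk.injEq] at h
          obtain ⟨hv, hc⟩ := h
          have h0 : xs.count v = 0 := by
            rw [hv]; exact List.count_eq_zero.mpr hxnot
          rw [hc, hv]
          simp [List.count_cons, h0]
          rw [← hv]
          exact h0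
        · have hmem' : (v, c) ∈ pvRle xs := by
            rw [hrec]; exact List.mem_cons.mpr h
          have hc : c = (xs.count v : Int) := ih hxs v c hmem'
          have hvmem : v ∈ xs := (pv_rle_mem xs v).mp (List.mem_map_of_mem hmem')
          have hvne : ¬ (v = x) := fun he => hxnot (he ▸ hvmem)
          have hvne' : ¬ (x = v) := fun he => hvne he.symm
          rw [hc]
          simp [List.count_cons, hvne, hvne']

-- pairwise < implies nodup
theorem pv_nodup_of_pairwise_lt (l : List Int) (h : l.Pairwise (· < ·)) : l.Nodup :=
  h.imp (fun hlt => by omega)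

-- two strictly increasing lists with the same members are equal
theorem pv_eq_of_mem_iff_pairwise_lt (l1 l2 : List Int)
    (h1 : l1.Pairwise (· < ·)) (h2 : l2.Pairwise (· < ·))
    (hmem : ∀ v, v ∈ l1 ↔ v ∈ l2) : l1 = l2 := by
  have hperm : l1.Perm l2 :=
    (List.perm_ext_iff_of_nodup (pv_nodup_of_pairwise_lt l1 h1)
      (pv_nodup_of_pairwise_lt l2 h2)).mpr hmem
  exact PySem.List.eq_of_perm_of_pairwise_le_of_injective (fun x => x)
    (fun a b h => h) hperm (h1.imp (fun h => le_of_lt h)) (h2.imp (fun h => le_of_lt h))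

-- B's pairs list, extras list and distinct count, each related to A's set-based data
def pvRuns (h : List Int) : List (Int × Int) :=
  pvRle (PySem.List.sorted h (fun x => x) false)

theorem pv_sorted_pairwise_le (h : List Int) :
    (PySem.List.sorted h (fun x => x) false).Pairwise (· ≤ ·) := by
  have := PySem.List.sorted_pairwise h (fun x => x)
  simpa using this

theorem pv_runs_mem (h : List Int) (v : Int) :
    v ∈ (pvRuns h).map Prod.fst ↔ v ∈ h := by
  rw [pvRuns, pv_rle_mem, PySem.List.mem_sorted]

theorem pv_runs_pairwise (h : List Int) : ((pvRuns h).map Prod.fst).Pairwise (· < ·) :=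
  pv_rle_pairwise _ (pv_sorted_pairwise_le h)

theorem pv_runs_count (h : List Int) (v c : Int) (hm : (v, c) ∈ pvRuns h) :
    c = (h.count v : Int) := by
  have := pv_rle_count _ (pv_sorted_pairwise_le h) v c hm
  rwa [(PySem.List.sorted_perm h (fun x => x) false).count_eq] at this

-- B's filtered-run value lists, as plain lists of distinct values
theorem pv_runs_filter_mem (h : List Int) (p : Int → Bool) (v : Int) :
    v ∈ ((pvRuns h).filter (fun q => p q.2)).map Prod.fst ↔
      v ∈ h ∧ p ((h.count v : Int)) = true := by
  constructor
  · intro hv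
    obtain ⟨⟨v', c⟩, hq, hv'⟩ := List.mem_map.mp hv
    obtain ⟨hqmem, hqp⟩ := List.mem_filter.mp hq
    have hveq : v' = v := hv'
    have hc := pv_runs_count h v' c hqmem
    rw [← hveq]
    refine ⟨(pv_runs_mem h v').mp (List.mem_map_of_mem hqmem), ?_⟩
    rw [← hc]
    simpa using hqp
  · intro hvp
    obtain ⟨⟨v', c⟩, hq, hv'⟩ := List.mem_map.mp ((pv_runs_mem h v).mpr hvp.1)
    have hveq : v' = v := hv'
    have hc := pv_runs_count h v' c hq
    have hp2 : p c = true := by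
      rw [hc, hveq]
      exact hvp.2
    exact List.mem_map.mpr ⟨(v', c), List.mem_filter.mpr ⟨hq, by simpa using hp2⟩, hv'⟩

theorem pv_runs_filter_pairwise (h : List Int) (p : Int → Bool) :
    (((pvRuns h).filter (fun q => p q.2)).map Prod.fst).Pairwise (· < ·) := by
  have hsub : ((pvRuns h).filter (fun q => p q.2)).Sublist (pvRuns h) :=
    List.filter_sublist
  exact List.Pairwise.sublist (hsub.map Prod.fst) (pv_runs_pairwise h)

-- membership in A's set-side lists
theorem pv_t_mem (h : List Int) (v : Int) :
    v ∈ PySem.List.sorted ((PySem.Set.ofList h).filter (fun v => PySem.List.count h v == 2)) (fun x => x) false ↔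
      v ∈ h ∧ h.count v = 2 := by
  rw [PySem.List.mem_sorted, List.mem_filter, PySem.Set.mem_ofList]
  simp [PySem.List.count_eq]

theorem pv_t_pairwise (h : List Int) :
    (PySem.List.sorted ((PySem.Set.ofList h).filter (fun v => PySem.List.count h v == 2)) (fun x => x) false).Pairwise (· < ·) := by
  have hnd : ((PySem.Set.ofList h).filter (fun v => PySem.List.count h v == 2)).Nodup :=
    (PySem.Set.nodup_ofList h).filter _
  have hle := pv_sorted_pairwise_le ((PySem.Set.ofList h).filter (fun v => PySem.List.count h v == 2))
  have hnd' : (PySem.List.sorted ((PySem.Set.ofList h).filter (fun v => PySem.List.count h v == 2)) (fun x => x) false).Nodup :=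
    (PySem.List.sorted_perm _ _ _).nodup_iff.mpr hnd
  exact (hle.and hnd').imp (fun ⟨h1, h2⟩ => by omega)

-- B's pairs list equals A's sorted pairs list
theorem pv_pairs_eq (h : List Int) :
    ((pvRuns h).filter (fun q => q.2 == 2)).map Prod.fst
      = PySem.List.sorted ((PySem.Set.ofList h).filter (fun v => PySem.List.count h v == 2)) (fun x => x) false := by
  apply pv_eq_of_mem_iff_pairwise_lt
  · exact pv_runs_filter_pairwise h (fun c => c == 2)
  · exact pv_t_pairwise h
  · intro v
    rw [pv_runs_filter_mem h (fun c => c == 2) v, pv_t_mem]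
    constructor
    · intro ⟨h1, h2⟩; exact ⟨h1, by simp at h2; omega⟩
    · intro ⟨h1, h2⟩; exact ⟨h1, by simp; omega⟩

-- B's extras list is a permutation of A's set-order extras list
theorem pv_extras_perm (h : List Int) :
    (((pvRuns h).filter (fun q => !(q.2 == 2))).map Prod.fst).Perm (pvExtras h) := by
  have hnd1 : (((pvRuns h).filter (fun q => !(q.2 == 2))).map Prod.fst).Nodup :=
    pv_nodup_of_pairwise_lt _ (pv_runs_filter_pairwise h (fun c => !(c == 2)))
  have hnd2 : (pvExtras h).Nodup := (PySem.Set.nodup_ofList h).filter _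
  refine (List.perm_ext_iff_of_nodup hnd1 hnd2).mpr (fun v => ?_)
  rw [pv_runs_filter_mem h (fun c => !(c == 2)) v]
  simp [pvExtras, PySem.Set.mem_ofList, PySem.List.count_eq]
  omega

-- B's distinct count equals A's set size
theorem pv_runs_len (h : List Int) :
    (pvRuns h).length = (PySem.Set.ofList h).length := by
  have hperm : ((pvRuns h).map Prod.fst).Perm (PySem.Set.ofList h) := by
    refine (List.perm_ext_iff_of_nodup
      (pv_nodup_of_pairwise_lt _ (pv_runs_pairwise h)) (PySem.Set.nodup_ofList h)).mpr ?_
    intro v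
    rw [pv_runs_mem, PySem.Set.mem_ofList]
  have := hperm.length_eq
  simpa using this

-- pvProfile's three components, written via pvRuns
theorem pv_profile_eq (h : List Int) :
    pvProfile h = (((pvRuns h).length == 3),
      ((pvRuns h).filter (fun q => q.2 == 2)).map Prod.fst,
      (match (pvRuns h).filter (fun q => !(q.2 == 2)) with
       | [] => (0 : Int)
       | p :: _ => p.1)) := rfl

-- B's qualify test equals A's set-size test
theorem pv_q_eq (h : List Int) :
    ((pvRuns h).length == 3) = (PySem.Set.len (PySem.Set.ofList h) == (3 : Int)) := by
  rw [Bool.eq_iff_iff]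
  simp [PySem.Set.len, pv_runs_len]
  omega

-- under at most one extra value, B's first-run extra equals A's last-set-iteration extra
theorem pv_extra_eq (h : List Int) (hlen : (pvExtras h).length ≤ 1) :
    (match (pvRuns h).filter (fun q => !(q.2 == 2)) with
     | [] => (0 : Int)
     | p :: _ => p.1)
    = (pvExtras h).foldl (fun _ i => i) 0 := by
  have hperm := pv_extras_perm h
  cases hf : (pvRuns h).filter (fun q => !(q.2 == 2)) with
  | nil =>
    rw [hf] at hperm
    simp only [List.map_nil] at hperm
    rw [hperm.symm.eq_nil]
    simp
  | cons p t =>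
    rw [hf] at hperm
    simp only [List.map_cons] at hperm
    have hlt : t.length = 0 := by
      have := hperm.length_eq
      simp at this
      omega
    have ht : t = [] := List.length_eq_zero_iff.mp hlt
    rw [ht] at hperm
    simp only [List.map_nil] at hperm
    have hx : pvExtras h = [p.1] := List.perm_singleton.mp hperm.symm
    rw [hx]
    simp

-- ===== VERDICT (by name: the statement is the Claim_ definition above) =====
theorem twoPairs_spec : Claim_equal_twoPairs := by
  intro hands _ hpre
  obtain ⟨hlen, himp⟩ := hpre
  match hands, hlen with
  | h0 :: h1 :: rest, _ =>
  simp only [List.getD_cons_zero, List.getD_cons_succ] at himp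
  have e0 : PySem.List.pyGet? (h0 :: h1 :: rest) 0 = some h0 := PySem.List.pyGet?_zero_cons h0 (h1 :: rest)
  have e1 : PySem.List.pyGet? (h0 :: h1 :: rest) 1 = some h1 := by simp
  unfold Spec_twoPairs twoPairs twoPairs_alt
  rw [e0, e1]
  simp only [pv_profile_eq, pv_q_eq]
  by_cases hq0 : (PySem.Set.len (PySem.Set.ofList h0) == (3 : Int)) = true
  · by_cases hq1 : (PySem.Set.len (PySem.Set.ofList h1) == (3 : Int)) = true
    · -- both hands qualify
      have hs0 : (PySem.Set.ofList h0).length = 3 := by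
        simp [PySem.Set.len] at hq0; omega
      have hs1 : (PySem.Set.ofList h1).length = 3 := by
        simp [PySem.Set.len] at hq1; omega
      obtain ⟨hn0, hn1⟩ := himp (by simpa using ⟨hs0, hs1⟩)
      simp only [hq0, hq1, Bool.and_self, if_true, pv_loop]
      rw [pv_pairs_eq h0, pv_pairs_eq h1]
      rw [pv_extra_eq h0 (by have := pv_extras_len h0; omega),
          pv_extra_eq h1 (by have := pv_extras_len h1; omega)]
      set t1 := PySem.List.sorted ((PySem.Set.ofList h0).filter (fun v => PySem.List.count h0 v == 2)) (fun x => x) false with ht1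
      set t2 := PySem.List.sorted ((PySem.Set.ofList h1).filter (fun v => PySem.List.count h1 v == 2)) (fun x => x) false with ht2
      have hl1 : 2 ≤ t1.length := by
        rw [ht1, PySem.List.length_sorted]; exact hn0
      have hl2 : 2 ≤ t2.length := by
        rw [ht2, PySem.List.length_sorted]; exact hn1
      have g11 : PySem.List.pyGet? t1 (1:Int) = some (t1[1]'(by omega)) := by
        simpa using PySem.List.pyGet?_ofNat t1 1 (by omega)
      have g21 : PySem.List.pyGet? t2 (1:Int) = some (t2[1]'(by omega)) := by
        simpa using PySem.List.pyGet?_ofNat t2 1 (by omega)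
      have g10 : PySem.List.pyGet? t1 (0:Int) = some (t1[0]'(by omega)) := by
        simpa using PySem.List.pyGet?_ofNat t1 0 (by omega)
      have g20 : PySem.List.pyGet? t2 (0:Int) = some (t2[0]'(by omega)) := by
        simpa using PySem.List.pyGet?_ofNat t2 0 (by omega)
      rw [g11, g21, g10, g20]
      exact pv_cascade _ _ _ _ _ _
    · have hp0 : ((PySem.Set.ofList h0).length : Int) = 3 := by
        simp [PySem.Set.len] at hq0; omega
      have hp1 : ¬ ((PySem.Set.ofList h1).length : Int) = 3 := by
        simp [PySem.Set.len] at hq1; omega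
      simp [hp0, hp1]
  · have hp0 : ¬ ((PySem.Set.ofList h0).length : Int) = 3 := by
      simp [PySem.Set.len] at hq0; omega
    by_cases hq1 : (PySem.Set.len (PySem.Set.ofList h1) == (3 : Int)) = true
    · have hp1 : ((PySem.Set.ofList h1).length : Int) = 3 := by
        simp [PySem.Set.len] at hq1; omega
      simp [hp0, hp1]
    · have hp1 : ¬ ((PySem.Set.ofList h1).length : Int) = 3 := by
        simp [PySem.Set.len] at hq1; omega
      simp [hp0, hp1]
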